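-- pv_equiv track=rewrite | github.com/JakeSaunders1995/comp16321MarkingMid | CW_rugby/rugby_s11642lf.py | Rugby
-- ===== SOURCE A (Python) =====
-- def Rugby(inputFile):
--
-- 	matchScore = inputFile #T1pT2c
--
-- 	team1 = []
-- 	team2 = []
--
-- 	index = 0
--
-- 	for item in matchScore:
-- 		if item == "T":
-- 			index += 1
--
-- 		elif item == "1":
-- 			team1.append(matchScore[index+1])
-- 			index += 1
--
-- 		elif item == "2":
-- 			team2.append(matchScore[index+1])
-- 			index += 1
--
-- 		else:
-- 			index+=1
-- 			pass
--
--
-- 	def ScoreTally(team):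
-- 				#t = 5
-- 				#c = 2
-- 				#p = 3
-- 				#d = 3
-- 		for num in range(0,len(team)):
-- 			if team[num] == "t":
-- 				team[num] = 5
-- 			elif team[num] == "c":
-- 				team[num] = 2
-- 			else:
-- 				team[num] = 3
--
-- 	ScoreTally(team1)
-- 	ScoreTally(team2)
--
-- 	score1 = sum(team1)
-- 	score2 = sum(team2)
--
--
-- 	score = str(score1)+":"+str(score2)
-- 	return score
-- ===== SOURCE B (Python) =====
-- def _points(ch):
--     if ch == "t":
--         return 5
--     if ch == "c":
--         return 2
--     return 3
--
--
-- def Rugby(inputFile):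
--     score1 = 0
--     score2 = 0
--     for i, ch in enumerate(inputFile):
--         if ch == "1":
--             score1 += _points(inputFile[i + 1])
--         elif ch == "2":
--             score2 += _points(inputFile[i + 1])
--     return str(score1) + ":" + str(score2)
-- ===== Notes on version B (the rewrite author's own statement) =====
-- stated objective: simpler
-- what changed: Replaces A's three passes (collect marker chars into two lists, mutate each list in place from chars to point values, then sum) by one linear pass keeping two integer score accumulators and adding the point value of the following char directly.
import Mathlib
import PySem

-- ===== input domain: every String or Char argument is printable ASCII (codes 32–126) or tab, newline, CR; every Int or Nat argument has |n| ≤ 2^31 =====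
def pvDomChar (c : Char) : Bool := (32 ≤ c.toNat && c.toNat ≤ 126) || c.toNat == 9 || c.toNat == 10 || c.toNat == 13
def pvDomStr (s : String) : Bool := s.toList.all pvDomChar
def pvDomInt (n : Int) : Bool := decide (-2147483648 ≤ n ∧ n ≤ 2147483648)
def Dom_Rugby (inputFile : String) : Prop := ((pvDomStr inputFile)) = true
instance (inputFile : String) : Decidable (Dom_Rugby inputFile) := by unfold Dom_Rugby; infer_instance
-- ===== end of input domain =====

-- B computes both team totals in one pass with two integer accumulators instead of
-- A's collect-into-lists / mutate-to-points / sum pipeline (objective: simpler).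


-- ===== PORT A =====
-- ScoreTally rewrites each element of the team list to its point value (the in-place
-- elementwise update of A, expressed as structural recursion over the list).
def pvScoreTally : List Char → List Int
  | [] => []
  | c :: rest =>
      (if c = 't' then (5 : Int) else if c = 'c' then (2 : Int) else (3 : Int)) :: pvScoreTally rest

def Rugby (inputFile : String) : String :=
  let matchScore := inputFile.toList
  -- the for-loop: state (team1, team2, index); matchScore[index+1] via pyGet?
  -- (none = IndexError, excluded by Pre_Rugby; .getD ' ' only outside Pre_).
  let st := matchScore.foldl
    (fun (st : List Char × List Char × Int) item =>
      let (team1, team2, index) := st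
      if item = 'T' then (team1, team2, index + 1)
      else if item = '1' then
        (team1 ++ [(PySem.List.pyGet? matchScore (index + 1)).getD ' '], team2, index + 1)
      else if item = '2' then
        (team1, team2 ++ [(PySem.List.pyGet? matchScore (index + 1)).getD ' '], index + 1)
      else (team1, team2, index + 1))
    ([], [], 0)
  let team1 := pvScoreTally st.1
  let team2 := pvScoreTally st.2.1
  PySem.Int.toStr team1.sum ++ ":" ++ PySem.Int.toStr team2.sum

-- ===== PORT B =====
def pvPoints (ch : Char) : Int :=
  if ch = 't' then 5 else if ch = 'c' then 2 else 3

-- 'for i, ch in enumerate(inputFile)' with two score accumulators.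
def pvGoB (ms : List Char) : List Char → Nat → Int → Int → Int × Int
  | [], _, score1, score2 => (score1, score2)
  | ch :: rest, i, score1, score2 =>
      if ch = '1' then
        pvGoB ms rest (i + 1) (score1 + pvPoints ((PySem.List.pyGet? ms ((i : Int) + 1)).getD ' ')) score2
      else if ch = '2' then
        pvGoB ms rest (i + 1) score1 (score2 + pvPoints ((PySem.List.pyGet? ms ((i : Int) + 1)).getD ' '))
      else
        pvGoB ms rest (i + 1) score1 score2

def Rugby_alt (inputFile : String) : String :=
  let ms := inputFile.toList
  let s := pvGoB ms ms 0 0 0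
  PySem.Int.toStr s.1 ++ ":" ++ PySem.Int.toStr s.2

-- ===== PRECONDITION & SPEC =====
-- A (and B) raise IndexError when the string ends in '1' or '2' (a marker with no
-- following score char); Pre_ excludes exactly those inputs.
def Pre_Rugby (inputFile : String) : Prop :=
  inputFile.toList.getLast? ≠ some '1' ∧ inputFile.toList.getLast? ≠ some '2'
instance (inputFile : String) : Decidable (Pre_Rugby inputFile) := by unfold Pre_Rugby; infer_instance
def pvWitness_Rugby : String := "T1pT2c"

def Spec_Rugby (inputFile : String) (out : String) : Prop := out = Rugby_alt inputFile
instance (inputFile : String) (out : String) : Decidable (Spec_Rugby inputFile out) := by unfold Spec_Rugby; infer_instance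

-- ===== CLAIM (what is proved, stated in full; the proofs are below) =====
def Claim_equal_Rugby : Prop := ∀ (inputFile : String), Dom_Rugby inputFile → Pre_Rugby inputFile → Spec_Rugby inputFile (Rugby inputFile)

-- ===== LEMMAS AND PROOFS =====

theorem pvScoreTally_append (l : List Char) (c : Char) :
    pvScoreTally (l ++ [c]) = pvScoreTally l ++ [pvPoints c] := by
  induction l with
  | nil => simp [pvScoreTally, pvPoints]
  | cons h t ih => simp [pvScoreTally, ih]

-- loop invariant: B's accumulators track the sums of A's (tallied) team lists
theorem pv_loop (ms : List Char) (rest : List Char) :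
    ∀ (k : Nat) (t1 t2 : List Char),
    pvGoB ms rest k (pvScoreTally t1).sum (pvScoreTally t2).sum =
      (let st := rest.foldl
        (fun (st : List Char × List Char × Int) item =>
          let (team1, team2, index) := st
          if item = 'T' then (team1, team2, index + 1)
          else if item = '1' then
            (team1 ++ [(PySem.List.pyGet? ms (index + 1)).getD ' '], team2, index + 1)
          else if item = '2' then
            (team1, team2 ++ [(PySem.List.pyGet? ms (index + 1)).getD ' '], index + 1)
          else (team1, team2, index + 1))
        (t1, t2, (k : Int))
       ((pvScoreTally st.1).sum, (pvScoreTally st.2.1).sum)) := by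
  induction rest with
  | nil => intro k t1 t2; simp [pvGoB]
  | cons ch rest ih =>
      intro k t1 t2
      by_cases hT : ch = 'T'
      · have h1 : ch ≠ '1' := by simp [hT]
        have h2 : ch ≠ '2' := by simp [hT]
        simpa [pvGoB, hT, h1, h2, Nat.cast_add] using ih (k + 1) t1 t2
      · by_cases h1 : ch = '1'
        · have := ih (k + 1) (t1 ++ [(PySem.List.pyGet? ms ((k : Int) + 1)).getD ' ']) t2
          simpa [pvGoB, hT, h1, pvScoreTally_append, Nat.cast_add] using this
        · by_cases h2 : ch = '2'
          · have := ih (k + 1) t1 (t2 ++ [(PySem.List.pyGet? ms ((k : Int) + 1)).getD ' '])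
            simpa [pvGoB, hT, h1, h2, pvScoreTally_append, Nat.cast_add] using this
          · simpa [pvGoB, hT, h1, h2, Nat.cast_add] using ih (k + 1) t1 t2

-- ===== VERDICT (by name: the statement is the Claim_ definition above) =====
theorem Rugby_spec : Claim_equal_Rugby := by
  unfold Claim_equal_Rugby
  intro inputFile _ _
  unfold Spec_Rugby Rugby Rugby_alt
  have h := pv_loop inputFile.toList inputFile.toList 0 [] []
  simp only [pvScoreTally, List.sum_nil, Nat.cast_zero] at h
  simp [h]
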